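-- pv_equiv track=rewrite | github.com/AldoLunaBueno/Competitive_Programming_4 | 2_data_structures/2.3_non_linear_ds/d_extra_deduplicatingfiles.py | calculate_colissions
-- ===== SOURCE A (Python) =====
-- from typing import Dict
--
-- def calculate_colissions(hashes: Dict[int, Dict[str, int]]):
--     num_collisions = 0
--     for file_count in hashes.values():
--         counts = list(file_count.values())
--         # taking two by two the files
--         for i in range(len(counts)-1):
--             for j in range(i+1, len(counts)):
--                 num_collisions += counts[i] * counts[j]
--     return num_collisions
-- ===== SOURCE B (Python) =====
-- def calculate_colissions(hashes):
--     total = 0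
--     for file_count in hashes.values():
--         s = 0
--         sq = 0
--         for c in file_count.values():
--             s += c
--             sq += c * c
--         total += (s * s - sq) // 2
--     return total
-- ===== Notes on version B (the rewrite author's own statement) =====
-- stated objective: faster
-- what changed: Replaces the quadratic nested index loop over each bucket's counts with a single pass computing the sum S and sum of squares Q, adding (S*S - Q)//2 per bucket.
import Mathlib
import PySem

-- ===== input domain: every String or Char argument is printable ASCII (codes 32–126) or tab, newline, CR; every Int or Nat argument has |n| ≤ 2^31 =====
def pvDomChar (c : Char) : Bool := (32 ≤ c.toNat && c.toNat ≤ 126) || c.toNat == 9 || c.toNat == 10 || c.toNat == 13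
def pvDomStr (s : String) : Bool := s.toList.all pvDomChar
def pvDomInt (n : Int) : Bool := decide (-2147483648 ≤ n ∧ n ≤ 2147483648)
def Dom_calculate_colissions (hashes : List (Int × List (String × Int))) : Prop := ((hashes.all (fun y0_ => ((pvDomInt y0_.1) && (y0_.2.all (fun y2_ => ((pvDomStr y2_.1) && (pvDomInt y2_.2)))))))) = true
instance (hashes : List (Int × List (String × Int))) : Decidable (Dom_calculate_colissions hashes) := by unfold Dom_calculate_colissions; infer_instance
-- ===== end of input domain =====

-- B replaces A's quadratic nested index loop per bucket by a single pass computing the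
-- sum S and the sum of squares Q of the counts and adding (S*S - Q)//2 (faster).

-- ===== PORT A =====
-- for file_count in hashes.values(): counts = list(file_count.values());
-- for i in range(len(counts)-1): for j in range(i+1, len(counts)): num += counts[i]*counts[j]
def calculate_colissions (hashes : List (Int × List (String × Int))) : Int :=
  hashes.foldl (fun num_collisions fc =>
    let counts : List Int := fc.2.map (·.2)
    (PySem.List.pyRange 0 ((counts.length : Int) - 1) 1).foldl (fun acc i =>
      (PySem.List.pyRange (i + 1) (counts.length : Int) 1).foldl (fun acc2 j =>
        acc2 + PySem.List.pyGetD counts i 0 * PySem.List.pyGetD counts j 0) acc)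
      num_collisions) 0

-- ===== PORT B =====
-- for file_count in hashes.values(): s = sq = 0; for c in file_count.values(): s += c; sq += c*c;
-- total += (s*s - sq) // 2
def calculate_colissions_alt (hashes : List (Int × List (String × Int))) : Int :=
  hashes.foldl (fun total fc =>
    let p := fc.2.foldl (fun (p : Int × Int) kv => (p.1 + kv.2, p.2 + kv.2 * kv.2)) (0, 0)
    total + PySem.Int.floordiv (p.1 * p.1 - p.2) 2) 0

-- ===== PRECONDITION & SPEC =====
def Spec_calculate_colissions (hashes : List (Int × List (String × Int))) (out : Int) : Prop := out = calculate_colissions_alt hashes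
instance (hashes : List (Int × List (String × Int))) (out : Int) : Decidable (Spec_calculate_colissions hashes out) := by unfold Spec_calculate_colissions; infer_instance

-- ===== CLAIM (what is proved, stated in full; the proofs are below) =====
def Claim_equal_calculate_colissions : Prop := ∀ (hashes : List (Int × List (String × Int))), Dom_calculate_colissions hashes → Spec_calculate_colissions hashes (calculate_colissions hashes)

-- ===== LEMMAS AND PROOFS =====

/-- Sum of pairwise products of the elements of a list. -/
def pvPairs : List Int → Int
  | [] => 0
  | x :: xs => x * xs.sum + pvPairs xs

lemma pvSumRange (counts : List Int) :
    ((List.range (counts.length - 1)).map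
      (fun k => counts.getD k 0 * (counts.drop (k + 1)).sum)).sum = pvPairs counts := by
  induction counts with
  | nil => simp [pvPairs]
  | cons x xs ih =>
    cases xs with
    | nil => simp [pvPairs]
    | cons y ys =>
      rw [show (x :: y :: ys).length - 1 = ys.length + 1 by simp,
        List.range_succ_eq_map, List.map_cons, List.sum_cons, List.map_map]
      have hmap : ((List.range ys.length).map
          ((fun k => (x :: y :: ys).getD k 0 * ((x :: y :: ys).drop (k + 1)).sum) ∘ Nat.succ))
          = (List.range ((y :: ys).length - 1)).map
            (fun k => (y :: ys).getD k 0 * ((y :: ys).drop (k + 1)).sum) := by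
        simp only [List.length_cons, Nat.add_sub_cancel]
        apply List.map_congr_left
        intro k _
        simp [Function.comp]
      rw [hmap, ih]
      simp [pvPairs]

lemma pvMapRangeEq (counts : List Int) :
    ((PySem.List.pyRange 0 ((counts.length : Int) - 1) 1).map
      (fun i => PySem.List.pyGetD counts i 0 * (counts.drop (i + 1).toNat).sum)).sum
    = pvPairs counts := by
  rw [← pvSumRange counts, PySem.List.pyRange_one, List.map_map]
  rw [show ((counts.length : Int) - 1 - 0).toNat = counts.length - 1 by omega]
  congr 1
  apply List.map_congr_left
  intro k _
  simp only [Function.comp, zero_add]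
  rw [PySem.List.pyGetD_natCast, show ((k : Int) + 1).toNat = k + 1 from by omega]

lemma pvBucketA (counts : List Int) (a : Int) :
    (PySem.List.pyRange 0 ((counts.length : Int) - 1) 1).foldl (fun acc i =>
      (PySem.List.pyRange (i + 1) (counts.length : Int) 1).foldl (fun acc2 j =>
        acc2 + PySem.List.pyGetD counts i 0 * PySem.List.pyGetD counts j 0) acc) a
    = a + pvPairs counts := by
  have hcong : ∀ (acc : Int), ∀ i ∈ PySem.List.pyRange 0 ((counts.length : Int) - 1) 1,
      (PySem.List.pyRange (i + 1) (counts.length : Int) 1).foldl (fun acc2 j =>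
        acc2 + PySem.List.pyGetD counts i 0 * PySem.List.pyGetD counts j 0) acc
      = acc + PySem.List.pyGetD counts i 0 * (counts.drop (i + 1).toNat).sum := by
    intro acc i hi
    have h0 : (0 : Int) ≤ i + 1 := by
      rcases PySem.List.mem_pyRange_one.mp hi with ⟨h, _⟩; omega
    rw [PySem.List.foldl_add _
        (fun j => PySem.List.pyGetD counts i 0 * PySem.List.pyGetD counts j 0) acc,
      List.sum_map_mul_left, PySem.List.map_pyGetD_pyRange' counts 0 h0]
  have h1 := PySem.List.foldl_congr_mem (PySem.List.pyRange 0 ((counts.length : Int) - 1) 1)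
    (fun (acc : Int) (i : Int) =>
      (PySem.List.pyRange (i + 1) (counts.length : Int) 1).foldl (fun acc2 j =>
        acc2 + PySem.List.pyGetD counts i 0 * PySem.List.pyGetD counts j 0) acc)
    (fun (acc : Int) (i : Int) =>
      acc + PySem.List.pyGetD counts i 0 * (counts.drop (i + 1).toNat).sum)
    a hcong
  have h2 := PySem.List.foldl_add (PySem.List.pyRange 0 ((counts.length : Int) - 1) 1)
    (fun (i : Int) => PySem.List.pyGetD counts i 0 * (counts.drop (i + 1).toNat).sum) a
  exact h1.trans (h2.trans (by rw [pvMapRangeEq]))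

lemma pvBucketB (fc : List (String × Int)) (s q : Int) :
    fc.foldl (fun (p : Int × Int) kv => (p.1 + kv.2, p.2 + kv.2 * kv.2)) (s, q)
    = (s + (fc.map (·.2)).sum, q + (fc.map (fun kv => kv.2 * kv.2)).sum) := by
  induction fc generalizing s q with
  | nil => simp
  | cons kv rest ih => simp [ih]; constructor <;> ring

lemma pvTwice (xs : List Int) :
    xs.sum * xs.sum - (xs.map (fun c => c * c)).sum = 2 * pvPairs xs := by
  induction xs with
  | nil => simp [pvPairs]
  | cons x xs ih => simp only [List.sum_cons, List.map_cons, pvPairs]; linear_combination ih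

lemma pvBucketsEq (fc : List (String × Int)) (t : Int) :
    t + PySem.Int.floordiv
      ((fc.foldl (fun (p : Int × Int) kv => (p.1 + kv.2, p.2 + kv.2 * kv.2)) (0, 0)).1
        * (fc.foldl (fun (p : Int × Int) kv => (p.1 + kv.2, p.2 + kv.2 * kv.2)) (0, 0)).1
        - (fc.foldl (fun (p : Int × Int) kv => (p.1 + kv.2, p.2 + kv.2 * kv.2)) (0, 0)).2) 2
    = t + pvPairs (fc.map (·.2)) := by
  rw [pvBucketB]
  simp only [zero_add]
  have hsq : (fc.map (fun kv => kv.2 * kv.2)).sum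
      = ((fc.map (·.2)).map (fun c => c * c)).sum := by
    rw [List.map_map]; rfl
  rw [hsq, pvTwice, PySem.Int.floordiv_eq_ediv_of_pos (by omega),
    Int.mul_ediv_cancel_left _ (by omega)]

lemma pvFoldA (hashes : List (Int × List (String × Int))) (a : Int) :
    hashes.foldl (fun num_collisions fc =>
      let counts : List Int := fc.2.map (·.2)
      (PySem.List.pyRange 0 ((counts.length : Int) - 1) 1).foldl (fun acc i =>
        (PySem.List.pyRange (i + 1) (counts.length : Int) 1).foldl (fun acc2 j =>
          acc2 + PySem.List.pyGetD counts i 0 * PySem.List.pyGetD counts j 0) acc)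
        num_collisions) a
    = hashes.foldl (fun (acc : Int) fc => acc + pvPairs (fc.2.map (·.2))) a := by
  induction hashes generalizing a with
  | nil => rfl
  | cons x l ih =>
    simp only [List.foldl_cons]
    rw [pvBucketA]
    exact ih _

lemma pvFoldB (hashes : List (Int × List (String × Int))) (a : Int) :
    hashes.foldl (fun total fc =>
      let p := fc.2.foldl (fun (p : Int × Int) kv => (p.1 + kv.2, p.2 + kv.2 * kv.2)) (0, 0)
      total + PySem.Int.floordiv (p.1 * p.1 - p.2) 2) a
    = hashes.foldl (fun (acc : Int) fc => acc + pvPairs (fc.2.map (·.2))) a := by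
  induction hashes generalizing a with
  | nil => rfl
  | cons x l ih =>
    simp only [List.foldl_cons]
    rw [pvBucketsEq]
    exact ih _

-- ===== VERDICT (by name: the statement is the Claim_ definition above) =====
theorem calculate_colissions_spec : Claim_equal_calculate_colissions := by
  intro hashes _
  show calculate_colissions hashes = calculate_colissions_alt hashes
  unfold calculate_colissions calculate_colissions_alt
  rw [pvFoldA, pvFoldB]
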